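-- pv_equiv track=rewrite | github.com/DiligentGraphics/DiligentCore | BuildTools/File2Include/script.py | convert_to_string_lines
-- ===== SOURCE A (Python) =====
-- def convert_to_string_lines(text):
--     special_chars = "'\"\\"
--     output = []
--
--     for line in text.splitlines():
--         quoted = ['"']
--
--         for c in line.rstrip():
--             if c in special_chars:
--                 quoted.append("\\")
--             quoted.append(c)
--
--         quoted.append('\\n"\n')
--         output.append("".join(quoted))
--
--     return "".join(output)
-- ===== SOURCE B (Python) =====
-- def convert_to_string_lines(text):
--     out = []
--     for line in text.splitlines():
--         escaped = (line.rstrip()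
--                    .replace("\\", "\\\\")
--                    .replace('"', '\\"')
--                    .replace("'", "\\'"))
--         out.append('"' + escaped + '\\n"\n')
--     return "".join(out)
-- ===== Notes on version B (the rewrite author's own statement) =====
-- stated objective: idiomatic
-- what changed: Replaces A's per-character inner loop with conditional backslash insertion by three whole-line str.replace passes (backslash first, then double quote, then single quote) and builds each output line by string concatenation.
import Mathlib
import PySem

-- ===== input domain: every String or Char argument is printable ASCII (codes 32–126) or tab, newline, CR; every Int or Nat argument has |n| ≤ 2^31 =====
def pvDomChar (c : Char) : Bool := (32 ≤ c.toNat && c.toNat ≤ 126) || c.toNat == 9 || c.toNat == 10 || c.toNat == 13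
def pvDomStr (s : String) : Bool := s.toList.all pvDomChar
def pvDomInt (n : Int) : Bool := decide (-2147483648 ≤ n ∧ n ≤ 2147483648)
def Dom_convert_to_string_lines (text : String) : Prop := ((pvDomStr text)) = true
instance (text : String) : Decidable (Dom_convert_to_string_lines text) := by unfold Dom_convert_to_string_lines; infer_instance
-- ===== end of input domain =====

-- B replaces A's per-character inner loop by three whole-line str.replace passes
-- (backslash first, then the quote characters); objective: idiomatic.

-- ===== PORT A =====
-- quoted/output are Python lists of strings; ported as List (List Char), "".join = PySem.Chars.join []
def convert_to_string_lines (text : String) : String :=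
  let special_chars : List Char := ['\'', '"', '\\']
  let output : List (List Char) :=
    (PySem.Chars.splitlines text.toList).foldl (fun output line =>
      let quoted : List (List Char) := [['"']]
      let quoted := (PySem.Chars.rstrip line).foldl (fun quoted c =>
        let quoted := if c ∈ special_chars then quoted ++ [['\\']] else quoted
        quoted ++ [[c]]) quoted
      let quoted := quoted ++ [['\\', 'n', '"', '\n']]
      output ++ [PySem.Chars.join [] quoted]) []
  String.ofList (PySem.Chars.join [] output)

-- ===== PORT B =====
def pvEscape (cs : List Char) : List Char :=
  PySem.Chars.replace
    (PySem.Chars.replace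
      (PySem.Chars.replace cs ['\\'] ['\\', '\\'])
      ['"'] ['\\', '"'])
    ['\''] ['\\', '\'']

def convert_to_string_lines_alt (text : String) : String :=
  String.ofList (PySem.Chars.join []
    ((PySem.Chars.splitlines text.toList).map (fun line =>
      '"' :: pvEscape (PySem.Chars.rstrip line) ++ ['\\', 'n', '"', '\n'])))

-- ===== PRECONDITION & SPEC =====
def Spec_convert_to_string_lines (text : String) (out : String) : Prop := out = convert_to_string_lines_alt text
instance (text : String) (out : String) : Decidable (Spec_convert_to_string_lines text out) := by unfold Spec_convert_to_string_lines; infer_instance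

-- ===== CLAIM (what is proved, stated in full; the proofs are below) =====
def Claim_equal_convert_to_string_lines : Prop := ∀ (text : String), Dom_convert_to_string_lines text → Spec_convert_to_string_lines text (convert_to_string_lines text)

-- ===== LEMMAS AND PROOFS =====

-- joining on the empty separator is flattening
theorem join_nil_eq_flatten (parts : List (List Char)) :
    PySem.Chars.join [] parts = parts.flatten := by
  induction parts with
  | nil => rfl
  | cons p ps ih =>
    cases ps with
    | nil => simp [PySem.Chars.join, List.intercalate]
    | cons q qs =>
      simp only [PySem.Chars.join, List.intercalate] at *
      simp [List.intersperse] at *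
      simpa using ih

-- replace with a single-character pattern is per-character substitution
theorem replace_go_singleton (a : Char) (new : List Char) :
    ∀ (l : List Char) (fuel : Nat) (acc : List Char), l.length ≤ fuel →
      PySem.Chars.replace.go [a] new fuel l acc =
        acc.reverse ++ l.flatMap (fun c => if c = a then new else [c]) := by
  intro l
  induction l with
  | nil =>
    intro fuel acc _
    cases fuel <;> simp [PySem.Chars.replace.go]
  | cons c t ih =>
    intro fuel acc h
    cases fuel with
    | zero => simp at h
    | succ f =>
      rw [PySem.Chars.replace.go]
      by_cases hc : c = a
      · subst hc
        simp only [List.isPrefixOf, beq_self_eq_true, Bool.true_and,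
          if_pos, List.length_cons, List.length_nil, Nat.zero_add, List.drop_succ_cons,
          List.drop_zero]
        rw [ih f (new.reverse ++ acc) (by simpa using Nat.le_of_succ_le_succ h)]
        simp
      · have : ¬ ([a].isPrefixOf (c :: t) = true) := by
          simp only [List.isPrefixOf, Bool.and_true, beq_iff_eq]
          intro h'; exact hc h'.symm
        rw [if_neg this]
        rw [ih f (c :: acc) (by simpa using Nat.le_of_succ_le_succ h)]
        simp [hc]

theorem replace_singleton (cs : List Char) (a : Char) (new : List Char) :
    PySem.Chars.replace cs [a] new =
      cs.flatMap (fun c => if c = a then new else [c]) := by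
  simp only [PySem.Chars.replace, List.isEmpty]
  · exact replace_go_singleton a new cs cs.length [] (le_refl _)

-- the per-character escaping function
def pvEsc (c : Char) : List Char :=
  if c = '\\' then ['\\', '\\']
  else if c = '"' then ['\\', '"']
  else if c = '\'' then ['\\', '\'']
  else [c]

theorem pvEscape_eq_flatMap (cs : List Char) :
    pvEscape cs = cs.flatMap pvEsc := by
  unfold pvEscape
  rw [replace_singleton, replace_singleton, replace_singleton]
  induction cs with
  | nil => rfl
  | cons c t ih =>
    simp only [List.flatMap_cons, List.flatMap_append, ih]
    congr 1
    unfold pvEsc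
    by_cases h1 : c = '\\' <;> by_cases h2 : c = '"' <;> by_cases h3 : c = '\'' <;>
      simp_all

-- A's inner loop, flattened
theorem inner_loop_flatten (rs : List Char) (q : List (List Char)) :
    (rs.foldl (fun quoted c =>
        (if c ∈ ['\'', '"', '\\'] then quoted ++ [['\\']] else quoted) ++ [[c]]) q).flatten =
      q.flatten ++ rs.flatMap pvEsc := by
  induction rs generalizing q with
  | nil => simp
  | cons c t ih =>
    simp only [List.foldl_cons]
    rw [ih]
    by_cases h1 : c = '\\' <;> by_cases h2 : c = '"' <;> by_cases h3 : c = '\'' <;>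
      simp_all [pvEsc]

-- ===== VERDICT (by name: the statement is the Claim_ definition above) =====
theorem convert_to_string_lines_spec : Claim_equal_convert_to_string_lines := by
  intro text _
  unfold Spec_convert_to_string_lines convert_to_string_lines convert_to_string_lines_alt
  simp only [PySem.List.foldl_append_singleton_eq_map, List.nil_append]
  rw [join_nil_eq_flatten, join_nil_eq_flatten]
  congr 1
  congr 1
  apply List.map_congr_left
  intro line _
  rw [join_nil_eq_flatten, pvEscape_eq_flatMap]
  simp only [List.flatten_append]
  rw [inner_loop_flatten]
  simp
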